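-- pv_equiv track=rewrite | github.com/MarioRodrigues10/LA2 | part2/viagem.py | viagem
-- ===== SOURCE A (Python) =====
-- import heapq
--
-- def viagem(rotas, o, d):
--     routes = {}
--     for r in rotas:
--         for i in range(len(r) - 2):
--             origin, cost, dest = r[i], r[i + 1], r[i + 2]
--             if (origin, dest) in routes:
--                 routes[(origin, dest)] = min(routes[(origin, dest)], cost)
--             else:
--                 routes[(origin, dest)] = cost
--
--     q = [(0, o)]
--     visited = set()
--     while q:
--         cost, node = heapq.heappop(q)
--         if node == d:
--             return cost
--         if node not in visited:
--             visited.add(node)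
--             for neighbor in [n for n in routes if node in n]:
--                 n = neighbor[1] if neighbor[0] == node else neighbor[0]
--                 c = cost + routes[neighbor]
--                 heapq.heappush(q, (c, n))
--
--     return -1
-- ===== SOURCE B (Python) =====
-- def viagem(rotas, o, d):
--     # Same graph parse as the original (overlapping triples, min-merged, undirected);
--     # then array-based Dijkstra: linear scan for the closest unvisited node instead of a heap.
--     routes = {}
--     for r in rotas:
--         for i in range(len(r) - 2):
--             origin, cost, dest = r[i], r[i + 1], r[i + 2]
--             if (origin, dest) in routes:
--                 routes[(origin, dest)] = min(routes[(origin, dest)], cost)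
--             else:
--                 routes[(origin, dest)] = cost
--
--     nodes = {o}
--     for (a, b) in routes:
--         nodes.add(a)
--         nodes.add(b)
--
--     dist = {o: 0}
--     visited = set()
--     for _ in range(len(nodes)):
--         best = None
--         for n, c in dist.items():
--             if n not in visited and (best is None or (c, n) < best):
--                 best = (c, n)
--         if best is None:
--             return -1
--         c, n = best
--         if n == d:
--             return c
--         visited.add(n)
--         for (a, b), w in routes.items():
--             if a == n or b == n:
--                 m = b if a == n else a
--                 nc = c + w
--                 if m not in dist or nc < dist[m]:
--                     dist[m] = nc
--     return -1
-- ===== Notes on version B (the rewrite author's own statement) =====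
-- stated objective: alternative
-- what changed: Replaces the heapq-based lazy Dijkstra loop with array-style Dijkstra: a dist dict plus visited set, where each round a linear scan selects the lexicographically closest unvisited node (bounded by the node count) and relaxes its undirected edges in place, instead of pushing/popping (cost, node) entries on a binary heap.
import Mathlib
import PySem

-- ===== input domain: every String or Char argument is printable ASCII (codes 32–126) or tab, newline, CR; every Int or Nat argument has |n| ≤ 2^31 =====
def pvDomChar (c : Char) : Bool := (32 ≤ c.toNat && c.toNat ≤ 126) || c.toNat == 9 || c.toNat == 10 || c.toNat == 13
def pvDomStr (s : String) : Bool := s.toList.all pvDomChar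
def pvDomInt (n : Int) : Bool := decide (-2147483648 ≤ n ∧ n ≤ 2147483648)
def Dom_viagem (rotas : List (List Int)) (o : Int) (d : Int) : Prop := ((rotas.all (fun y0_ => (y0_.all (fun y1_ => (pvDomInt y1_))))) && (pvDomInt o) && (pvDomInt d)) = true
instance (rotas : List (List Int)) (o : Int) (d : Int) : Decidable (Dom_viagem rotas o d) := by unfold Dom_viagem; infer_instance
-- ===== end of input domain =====

-- B replaces A's lazy binary heap by array-style Dijkstra (linear scan for the closest
-- unvisited node, bounded by the node count); the graph parse is the same. Objective: alternative.

-- ===== PORT A =====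
-- Shared graph parse (this loop is textually identical in both Pythons):
-- routes[(r[i], r[i+2])] = min-merge of r[i+1] over overlapping triples.
-- Indices i, i+1, i+2 produced by range(len(r)-2) are always in range, so pyGetD _ _ 0 is exact.
def buildRoutes (rotas : List (List Int)) : PySem.Dict (Int × Int) Int :=
  rotas.foldl (fun routes r =>
    (PySem.List.pyRange 0 ((r.length : Int) - 2) 1).foldl (fun routes i =>
      let origin := PySem.List.pyGetD r i 0
      let cost   := PySem.List.pyGetD r (i + 1) 0
      let dest   := PySem.List.pyGetD r (i + 2) 0
      match routes.get? (origin, dest) with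
      | some c0 => routes.insert (origin, dest) (min c0 cost)
      | none    => routes.insert (origin, dest) cost) routes) PySem.Dict.empty

-- heapq comparison on (cost, node) tuples: lexicographic ≤ on Int × Int.
def lexLe (x y : Int × Int) : Bool := decide (x.1 < y.1 ∨ (x.1 = y.1 ∧ x.2 ≤ y.2))

-- heapq ported by its observable semantics: the heap is the multiset of entries,
-- heappop removes a lexicographically least entry (equal-least entries are identical
-- (cost, node) pairs, so which occurrence is removed is unobservable), heappush appends.
def popMin : List (Int × Int) → Option ((Int × Int) × List (Int × Int))
  | [] => none
  | x :: xs =>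
    match popMin xs with
    | none => some (x, [])
    | some (m, rest) => if lexLe x m then some (x, xs) else some (m, x :: rest)

-- the entries A pushes when it visits `node` with distance `cost`
-- ([n for n in routes if node in n], undirected other endpoint, cost + routes[n])
def pushesOf (items : List ((Int × Int) × Int)) (node cost : Int) : List (Int × Int) :=
  (items.filter (fun kv => kv.1.1 == node || kv.1.2 == node)).map
    (fun kv => (cost + kv.2, if kv.1.1 == node then kv.1.2 else kv.1.1))

def keyFinset (routes : PySem.Dict (Int × Int) Int) : Finset Int :=
  (routes.items.flatMap (fun kv => [kv.1.1, kv.1.2])).toFinset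

def measA (routes : PySem.Dict (Int × Int) Int) (q : List (Int × Int))
    (visited : PySem.Set Int) : Nat :=
  ((keyFinset routes ∪ (q.map Prod.snd).toFinset) \ visited.toFinset).card
    * (routes.items.length + 1) + q.length

theorem popMin_eq_none : ∀ {q : List (Int × Int)}, popMin q = none → q = [] := by
  intro q
  fun_induction popMin q with
  | case1 => intro; rfl
  | case2 x xs hx => intro h; simp at h
  | case3 x xs m rest hx hle ih => intro h; simp at h
  | case4 x xs m rest hx hle ih => intro h; simp at h

theorem popMin_perm : ∀ {q : List (Int × Int)} {e q'},
    popMin q = some (e, q') → q.Perm (e :: q') := by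
  intro q
  fun_induction popMin q with
  | case1 => intro e q' h; simp at h
  | case2 x xs hx =>
    intro e q' h
    simp only [Option.some.injEq, Prod.mk.injEq] at h
    rw [← h.1, ← h.2, popMin_eq_none hx]
  | case3 x xs m rest hx hle ih =>
    intro e q' h
    simp only [Option.some.injEq, Prod.mk.injEq] at h
    rw [← h.1, ← h.2]
  | case4 x xs m rest hx hle ih =>
    intro e q' h
    simp only [Option.some.injEq, Prod.mk.injEq] at h
    rw [← h.1, ← h.2]
    exact ((ih hx).cons x).trans (List.Perm.swap m x rest)

theorem pushesOf_snd_mem {items : List ((Int × Int) × Int)} {node cost : Int} {e : Int × Int}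
    (h : e ∈ pushesOf items node cost) :
    e.2 ∈ items.flatMap (fun kv => [kv.1.1, kv.1.2]) := by
  simp only [pushesOf, List.mem_map, List.mem_filter] at h
  obtain ⟨kv, ⟨hkv, _⟩, rfl⟩ := h
  simp only [List.mem_flatMap]
  exact ⟨kv, hkv, by split <;> simp⟩

theorem length_pushesOf (items : List ((Int × Int) × Int)) (node cost : Int) :
    (pushesOf items node cost).length ≤ items.length := by
  simp only [pushesOf, List.length_map]
  exact List.length_filter_le _ _

theorem measA_lt_skip {routes : PySem.Dict (Int × Int) Int} {q q' : List (Int × Int)}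
    {e : Int × Int} (visited : PySem.Set Int) (h : popMin q = some (e, q')) :
    measA routes q' visited < measA routes q visited := by
  have hperm := popMin_perm h
  have hlen : q.length = q'.length + 1 := by simpa using hperm.length_eq
  have hsub : (keyFinset routes ∪ (q'.map Prod.snd).toFinset) \ visited.toFinset
      ⊆ (keyFinset routes ∪ (q.map Prod.snd).toFinset) \ visited.toFinset := by
    apply Finset.sdiff_subset_sdiff _ (subset_refl _)
    apply Finset.union_subset_union_right
    intro x hx
    simp only [List.mem_toFinset, List.mem_map] at hx ⊢
    obtain ⟨y, hy, rfl⟩ := hx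
    exact ⟨y, hperm.mem_iff.mpr (List.mem_cons_of_mem e hy), rfl⟩
  have hcard := Finset.card_le_card hsub
  have := Nat.mul_le_mul_right (routes.items.length + 1) hcard
  unfold measA
  omega

theorem measA_lt_visit {routes : PySem.Dict (Int × Int) Int} {q q' : List (Int × Int)}
    {c n : Int} {visited : PySem.Set Int} (h : popMin q = some ((c, n), q'))
    (hvis : PySem.Set.contains visited n = false) :
    measA routes (q' ++ pushesOf routes.items n c) (PySem.Set.add visited n)
      < measA routes q visited := by
  have hperm := popMin_perm h
  have hlen : q.length = q'.length + 1 := by simpa using hperm.length_eq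
  have hnv : n ∉ visited.toFinset := by
    simp only [List.mem_toFinset]
    simpa using hvis
  have hnq : n ∈ (q.map Prod.snd).toFinset := by
    simp only [List.mem_toFinset, List.mem_map]
    exact ⟨(c, n), hperm.mem_iff.mpr (List.mem_cons_self), rfl⟩
  set S := (keyFinset routes ∪ (q.map Prod.snd).toFinset) \ visited.toFinset with hS
  have hnS : n ∈ S := Finset.mem_sdiff.mpr ⟨Finset.mem_union_right _ hnq, hnv⟩
  have hsub : (keyFinset routes ∪ ((q' ++ pushesOf routes.items n c).map Prod.snd).toFinset)
      \ (PySem.Set.add visited n).toFinset ⊆ S.erase n := by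
    intro x hx
    simp only [Finset.mem_sdiff, Finset.mem_union, List.mem_toFinset, List.mem_map] at hx
    obtain ⟨hx1, hx2⟩ := hx
    have hxn : x ≠ n := by
      intro rfl'
      subst rfl'
      exact hx2 ((PySem.Set.mem_add _ _ _).mpr (Or.inr rfl))
    have hxv : x ∉ visited.toFinset := by
      simp only [List.mem_toFinset]
      intro hm
      exact hx2 ((PySem.Set.mem_add _ _ _).mpr (Or.inl hm))
    apply Finset.mem_erase.mpr
    refine ⟨hxn, Finset.mem_sdiff.mpr ⟨?_, hxv⟩⟩
    rcases hx1 with hk | ⟨y, hy, rfl⟩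
    · exact Finset.mem_union_left _ hk
    · rcases List.mem_append.mp hy with hy' | hyp
      · exact Finset.mem_union_right _ (by
          simp only [List.mem_toFinset, List.mem_map]
          exact ⟨y, hperm.mem_iff.mpr (List.mem_cons_of_mem _ hy'), rfl⟩)
      · exact Finset.mem_union_left _ (by
          simpa [keyFinset, List.mem_toFinset] using pushesOf_snd_mem hyp)
  have hcard : ((keyFinset routes ∪ ((q' ++ pushesOf routes.items n c).map Prod.snd).toFinset)
      \ (PySem.Set.add visited n).toFinset).card + 1 ≤ S.card := by
    have h1 := Finset.card_le_card hsub
    have h2 : (S.erase n).card + 1 = S.card := Finset.card_erase_add_one hnS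
    omega
  have hp := length_pushesOf routes.items n c
  unfold measA
  rw [← hS]
  set K := routes.items.length with hK
  set a := ((keyFinset routes ∪ ((q' ++ pushesOf routes.items n c).map Prod.snd).toFinset)
      \ (PySem.Set.add visited n).toFinset).card
  have hmul : (a + 1) * (K + 1) ≤ S.card * (K + 1) := Nat.mul_le_mul_right _ hcard
  rw [Nat.succ_mul] at hmul
  rw [List.length_append]
  omega

def viagemLoop (routes : PySem.Dict (Int × Int) Int) (d : Int)
    (q : List (Int × Int)) (visited : PySem.Set Int) : Int :=
  match h : popMin q with
  | none => -1
  | some ((cost, node), q') =>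
    if node = d then cost
    else if PySem.Set.contains visited node then
      viagemLoop routes d q' visited
    else
      viagemLoop routes d (q' ++ pushesOf routes.items node cost)
        (PySem.Set.add visited node)
termination_by measA routes q visited
decreasing_by
  · exact measA_lt_skip visited h
  · simp only [Bool.not_eq_true] at *
    exact measA_lt_visit h (by assumption)

def viagem (rotas : List (List Int)) (o : Int) (d : Int) : Int :=
  viagemLoop (buildRoutes rotas) d [(0, o)] PySem.Set.empty

-- ===== PORT B =====
-- lex-min (dist, node) among unvisited entries of the dist dict (B's linear scan);
-- the loop body is the named step sbStep so the proofs can speak about it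
def sbStep (visited : PySem.Set Int) (best : Option (Int × Int)) (nc : Int × Int) :
    Option (Int × Int) :=
  if PySem.Set.contains visited nc.1 then best
  else
    match best with
    | none => some (nc.2, nc.1)
    | some b => if lexLe (nc.2, nc.1) b && !(lexLe b (nc.2, nc.1)) then some (nc.2, nc.1) else best

def sbFold (visited : PySem.Set Int) (l : List (Int × Int)) (acc : Option (Int × Int)) :
    Option (Int × Int) :=
  l.foldl (sbStep visited) acc

def selectBest (dist : PySem.Dict Int Int) (visited : PySem.Set Int) : Option (Int × Int) :=
  sbFold visited dist.items none

-- relax all undirected edges out of `node` (dist[m] = min(dist.get(m, inf), cost + w))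
def relax (items : List ((Int × Int) × Int)) (node cost : Int)
    (dist : PySem.Dict Int Int) : PySem.Dict Int Int :=
  items.foldl (fun dist kv =>
    if kv.1.1 == node || kv.1.2 == node then
      let m := if kv.1.1 == node then kv.1.2 else kv.1.1
      let nc := cost + kv.2
      match dist.get? m with
      | none => dist.insert m nc
      | some old => if nc < old then dist.insert m nc else dist
    else dist) dist

def altLoop (routes : PySem.Dict (Int × Int) Int) (d : Int) :
    Nat → PySem.Dict Int Int → PySem.Set Int → Int
  | 0, _, _ => -1
  | k + 1, dist, visited =>
    match selectBest dist visited with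
    | none => -1
    | some (c, n) =>
      if n = d then c
      else altLoop routes d k (relax routes.items n c dist) (PySem.Set.add visited n)

def viagem_alt (rotas : List (List Int)) (o : Int) (d : Int) : Int :=
  let routes := buildRoutes rotas
  -- range(len(nodes)): len(nodes) iterations, a Nat count
  let nodes : PySem.Set Int :=
    PySem.Set.ofList (o :: routes.items.flatMap (fun kv => [kv.1.1, kv.1.2]))
  altLoop routes d nodes.length (PySem.Dict.empty.insert o 0) PySem.Set.empty

-- ===== PRECONDITION & SPEC =====
def Spec_viagem (rotas : List (List Int)) (o : Int) (d : Int) (out : Int) : Prop := out = viagem_alt rotas o d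
instance (rotas : List (List Int)) (o : Int) (d : Int) (out : Int) : Decidable (Spec_viagem rotas o d out) := by unfold Spec_viagem; infer_instance

-- ===== CLAIM (what is proved, stated in full; the proofs are below) =====
def Claim_equal_viagem : Prop := ∀ (rotas : List (List Int)) (o : Int) (d : Int), Dom_viagem rotas o d → Spec_viagem rotas o d (viagem rotas o d)

-- ===== LEMMAS AND PROOFS =====

theorem popMin_le : ∀ {q : List (Int × Int)} {e q'},
    popMin q = some (e, q') → ∀ x ∈ q, lexLe e x := by
  intro q
  fun_induction popMin q with
  | case1 => intro e q' h; simp at h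
  | case2 x xs hx =>
    intro e q' h y hy
    simp only [Option.some.injEq, Prod.mk.injEq] at h
    rw [popMin_eq_none hx] at hy
    simp at hy
    rw [← h.1, hy]
    simp [lexLe]
  | case3 x xs m rest hx hle ih =>
    intro e q' h y hy
    simp only [Option.some.injEq, Prod.mk.injEq] at h
    rw [← h.1]
    rcases List.mem_cons.mp hy with rfl | hy'
    · simp [lexLe]
    · have := ih hx y hy'
      simp only [lexLe, decide_eq_true_eq] at *
      omega
  | case4 x xs m rest hx hle ih =>
    intro e q' h y hy
    simp only [Option.some.injEq, Prod.mk.injEq] at h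
    rw [← h.1]
    rcases List.mem_cons.mp hy with rfl | hy'
    · simp only [lexLe, decide_eq_true_eq] at *
      omega
    · exact ih hx y hy'


-- lexLe is a total order on (cost, node) pairs
theorem lexLe_refl (x : Int × Int) : lexLe x x := by simp [lexLe]

theorem lexLe_trans {x y z : Int × Int} (h1 : lexLe x y) (h2 : lexLe y z) : lexLe x z := by
  simp only [lexLe, decide_eq_true_eq] at *; omega

theorem lexLe_total {x y : Int × Int} (h : ¬ lexLe x y = true) : lexLe y x := by
  simp only [lexLe, decide_eq_true_eq] at *; omega

theorem lexLe_antisymm {x y : Int × Int} (h1 : lexLe x y) (h2 : lexLe y x) : x = y := by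
  simp only [lexLe, decide_eq_true_eq] at *
  obtain ⟨a, b⟩ := x; obtain ⟨c, d⟩ := y
  simp only [Prod.mk.injEq]
  dsimp at h1 h2
  omega

-- minimum cost among heap entries for a given node (none = no entry): A's implicit dist map
def minCost : List (Int × Int) → Int → Option Int
  | [], _ => none
  | e :: q, m =>
    let r := minCost q m
    if e.2 = m then some (match r with | none => e.1 | some c => min e.1 c) else r

-- pointwise min on Option Int (none = +inf)
def omin (a b : Option Int) : Option Int :=
  match a, b with
  | none, b => b
  | some x, none => some x
  | some x, some y => some (min x y)

theorem omin_assoc (a b c : Option Int) : omin (omin a b) c = omin a (omin b c) := by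
  cases a <;> cases b <;> cases c <;> simp [omin, min_assoc]

theorem minCost_cons_self (e : Int × Int) (q : List (Int × Int)) :
    minCost (e :: q) e.2 = omin (some e.1) (minCost q e.2) := by
  simp only [minCost, if_pos]
  cases minCost q e.2 <;> simp [omin]

theorem minCost_cons_ne {e : Int × Int} {m : Int} (h : e.2 ≠ m) (q : List (Int × Int)) :
    minCost (e :: q) m = minCost q m := by
  simp [minCost, h]

theorem minCost_eq_none_iff {q : List (Int × Int)} {m : Int} :
    minCost q m = none ↔ ∀ c, (c, m) ∉ q := by
  induction q with
  | nil => simp [minCost]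
  | cons e q ih =>
    by_cases he : e.2 = m
    · subst he
      rw [minCost_cons_self]
      have hmem : (e.1, e.2) ∈ e :: q := by simp
      constructor
      · intro h; exfalso; cases hq : minCost q e.2 <;> simp [omin, hq] at h
      · intro h; exact absurd hmem (h e.1)
    · rw [minCost_cons_ne he, ih]
      constructor
      · intro h c hc
        rcases List.mem_cons.mp hc with h1 | h1
        · exact he (congrArg Prod.snd h1).symm
        · exact h c h1
      · exact fun h c hc => h c (List.mem_cons_of_mem _ hc)

theorem minCost_append (q1 q2 : List (Int × Int)) (m : Int) :
    minCost (q1 ++ q2) m = omin (minCost q1 m) (minCost q2 m) := by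
  induction q1 with
  | nil => cases h2 : minCost q2 m <;> simp [minCost, omin, h2]
  | cons e q1 ih =>
    by_cases he : e.2 = m
    · subst he
      rw [List.cons_append, minCost_cons_self, ih, minCost_cons_self, omin_assoc]
    · rw [List.cons_append, minCost_cons_ne he, ih, minCost_cons_ne he]

theorem minCost_eq_some_iff {q : List (Int × Int)} {m : Int} : ∀ {c : Int},
    minCost q m = some c ↔ (c, m) ∈ q ∧ ∀ c', (c', m) ∈ q → c ≤ c' := by
  induction q with
  | nil => intro c; simp [minCost]
  | cons e q ih =>
    intro c
    by_cases he : e.2 = m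
    · subst he
      rw [minCost_cons_self]
      cases hq : minCost q e.2 with
      | none =>
        have hnone : ∀ c', (c', e.2) ∉ q := minCost_eq_none_iff.mp hq
        simp only [omin, Option.some.injEq]
        constructor
        · rintro rfl
          refine ⟨by simp, ?_⟩
          intro c' hc'
          rcases List.mem_cons.mp hc' with h1 | h1
          · exact le_of_eq (show e.1 = c' from (congrArg Prod.fst h1).symm)
          · exact absurd h1 (hnone c')
        · rintro ⟨h1, h2⟩
          rcases List.mem_cons.mp h1 with h3 | h3
          · exact (show c = e.1 from congrArg Prod.fst h3).symm
          · exact absurd h3 (hnone c)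
      | some c0 =>
        simp only [omin, Option.some.injEq]
        have hq' := (ih (c := c0)).mp hq
        constructor
        · rintro rfl
          constructor
          · rcases le_total e.1 c0 with hle | hle
            · rw [min_eq_left hle]
              exact List.mem_cons_self
            · rw [min_eq_right hle]
              exact List.mem_cons_of_mem _ hq'.1
          · intro c' hc'
            rcases List.mem_cons.mp hc' with h1 | h1
            · have hx : c' = e.1 := congrArg Prod.fst h1
              rw [hx]
              exact min_le_left _ _
            · exact le_trans (min_le_right _ _) (hq'.2 c' h1)
        · rintro ⟨h1, h2⟩
          have hle1 : c ≤ e.1 := h2 e.1 List.mem_cons_self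
          have hle2 : c ≤ c0 := h2 c0 (List.mem_cons_of_mem _ hq'.1)
          have hge : min e.1 c0 ≤ c := by
            rcases List.mem_cons.mp h1 with h3 | h3
            · have hx : c = e.1 := congrArg Prod.fst h3
              rw [hx]
              exact min_le_left _ _
            · exact le_trans (min_le_right _ _) (hq'.2 c h3)
          omega
    · rw [minCost_cons_ne he]
      constructor
      · intro h
        obtain ⟨h1, h2⟩ := ih.mp h
        refine ⟨List.mem_cons_of_mem _ h1, ?_⟩
        intro c' hc'
        rcases List.mem_cons.mp hc' with h3 | h3
        · exact absurd (congrArg Prod.snd h3).symm he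
        · exact h2 c' h3
      · intro ⟨h1, h2⟩
        apply ih.mpr
        refine ⟨?_, fun c' hc' => h2 c' (List.mem_cons_of_mem _ hc')⟩
        rcases List.mem_cons.mp h1 with h3 | h3
        · exact absurd (congrArg Prod.snd h3).symm (by simpa using he)
        · exact h3

theorem minCost_perm {q q' : List (Int × Int)} (h : q.Perm q') (m : Int) :
    minCost q m = minCost q' m := by
  cases hq : minCost q m with
  | none =>
    symm
    rw [minCost_eq_none_iff] at hq ⊢
    exact fun c hc => hq c (h.mem_iff.mpr hc)
  | some c =>
    symm
    rw [minCost_eq_some_iff] at hq ⊢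
    exact ⟨h.mem_iff.mp hq.1, fun c' hc' => hq.2 c' (h.mem_iff.mpr hc')⟩


-- ---- consequences of popMin for A's implicit dist map ----
theorem minCost_pop_self {q q' : List (Int × Int)} {c n : Int}
    (h : popMin q = some ((c, n), q')) : minCost q n = some c := by
  apply minCost_eq_some_iff.mpr
  refine ⟨(popMin_perm h).mem_iff.mpr List.mem_cons_self, ?_⟩
  intro c' hc'
  have := popMin_le h _ hc'
  simp only [lexLe, decide_eq_true_eq] at this
  omega

theorem minCost_pop_ne {q q' : List (Int × Int)} {c n m : Int}
    (h : popMin q = some ((c, n), q')) (hm : m ≠ n) : minCost q m = minCost q' m := by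
  rw [minCost_perm (popMin_perm h) m]
  exact minCost_cons_ne (by simpa using hm.symm) q'

-- ---- sbFold (B's linear scan) ----
theorem sbFold_cons (vis : PySem.Set Int) (p : Int × Int) (l : List (Int × Int))
    (acc : Option (Int × Int)) : sbFold vis (p :: l) acc = sbFold vis l (sbStep vis acc p) := rfl

theorem sbStep_vis {vis : PySem.Set Int} {p : Int × Int} (acc : Option (Int × Int))
    (h : PySem.Set.contains vis p.1 = true) : sbStep vis acc p = acc := by
  simp only [sbStep]
  rw [if_pos h]

theorem sbStep_unvis_none {vis : PySem.Set Int} {p : Int × Int}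
    (h : PySem.Set.contains vis p.1 = false) : sbStep vis none p = some (p.2, p.1) := by
  simp only [sbStep]
  rw [if_neg (by rw [h]; exact Bool.false_ne_true)]

theorem sbStep_unvis_some {vis : PySem.Set Int} {p : Int × Int} (b : Int × Int)
    (h : PySem.Set.contains vis p.1 = false) :
    sbStep vis (some b) p =
      if lexLe (p.2, p.1) b && !(lexLe b (p.2, p.1)) then some (p.2, p.1) else some b := by
  simp only [sbStep]
  rw [if_neg (by rw [h]; exact Bool.false_ne_true)]

theorem sbFold_all_visited {vis : PySem.Set Int} :
    ∀ (l : List (Int × Int)) (acc), (∀ p ∈ l, PySem.Set.contains vis p.1 = true) →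
    sbFold vis l acc = acc := by
  intro l
  induction l with
  | nil => intro acc _; rfl
  | cons p l ih =>
    intro acc h
    rw [sbFold_cons, sbStep_vis acc (h p List.mem_cons_self)]
    exact ih acc (fun p' hp' => h p' (List.mem_cons_of_mem _ hp'))

theorem sbFold_some_ne_none {vis : PySem.Set Int} :
    ∀ (l : List (Int × Int)) (a), sbFold vis l (some a) ≠ none := by
  intro l
  induction l with
  | nil => intro a h; simp [sbFold] at h
  | cons p l ih =>
    intro a
    rw [sbFold_cons]
    cases hv : PySem.Set.contains vis p.1 with
    | true => rw [sbStep_vis _ hv]; exact ih a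
    | false =>
      rw [sbStep_unvis_some _ hv]
      split <;> apply ih

theorem sbFold_ne_none_of_mem {vis : PySem.Set Int} {n c : Int} :
    ∀ (l : List (Int × Int)) (acc), (n, c) ∈ l → PySem.Set.contains vis n = false →
    sbFold vis l acc ≠ none := by
  intro l
  induction l with
  | nil => intro acc h _; simp at h
  | cons p l ih =>
    intro acc hmem hun
    rcases List.mem_cons.mp hmem with rfl | hmem'
    · rw [sbFold_cons]
      cases acc with
      | none =>
        rw [sbStep_unvis_none hun]
        exact sbFold_some_ne_none l _
      | some b =>
        rw [sbStep_unvis_some b hun]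
        split <;> exact sbFold_some_ne_none l _
    · rw [sbFold_cons]
      exact ih _ hmem' hun

theorem sbFold_some {vis : PySem.Set Int} :
    ∀ (l : List (Int × Int)) (acc b), sbFold vis l acc = some b →
    (acc = some b ∨ ∃ p ∈ l, PySem.Set.contains vis p.1 = false ∧ b = (p.2, p.1))
    ∧ (∀ a, acc = some a → lexLe b a)
    ∧ (∀ p ∈ l, PySem.Set.contains vis p.1 = false → lexLe b (p.2, p.1)) := by
  intro l
  induction l with
  | nil =>
    intro acc b h
    simp only [sbFold, List.foldl_nil] at h
    refine ⟨Or.inl h, fun a ha => ?_, fun p hp => absurd hp List.not_mem_nil⟩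
    rw [h] at ha
    injection ha with ha'
    rw [ha']
    exact lexLe_refl _
  | cons p l ih =>
    intro acc b h
    rw [sbFold_cons] at h
    cases hv : PySem.Set.contains vis p.1 with
    | true =>
      rw [sbStep_vis acc hv] at h
      obtain ⟨hmem, hacc, hall⟩ := ih acc b h
      refine ⟨?_, hacc, ?_⟩
      · rcases hmem with h1 | ⟨p', hp', h2⟩
        · exact Or.inl h1
        · exact Or.inr ⟨p', List.mem_cons_of_mem _ hp', h2⟩
      · intro p' hp' hv'
        rcases List.mem_cons.mp hp' with rfl | hp''
        · rw [hv'] at hv; exact absurd hv Bool.false_ne_true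
        · exact hall p' hp'' hv'
    | false =>
      cases acc with
      | none =>
        rw [sbStep_unvis_none hv] at h
        obtain ⟨hmem, hacc, hall⟩ := ih _ b h
        have hbp : lexLe b (p.2, p.1) := hacc _ rfl
        refine ⟨?_, fun a ha => by simp at ha, ?_⟩
        · rcases hmem with h1 | ⟨p', hp', h2⟩
          · injection h1 with h1'
            exact Or.inr ⟨p, List.mem_cons_self, hv, h1'.symm⟩
          · exact Or.inr ⟨p', List.mem_cons_of_mem _ hp', h2⟩
        · intro p' hp' hv'
          rcases List.mem_cons.mp hp' with rfl | hp''
          · exact hbp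
          · exact hall p' hp'' hv'
      | some b0 =>
        rw [sbStep_unvis_some b0 hv] at h
        by_cases hlt : (lexLe (p.2, p.1) b0 && !(lexLe b0 (p.2, p.1))) = true
        · rw [if_pos hlt] at h
          obtain ⟨hmem, hacc, hall⟩ := ih _ b h
          have hbp : lexLe b (p.2, p.1) := hacc _ rfl
          have hpb0 : lexLe (p.2, p.1) b0 := (Bool.and_eq_true _ _ ▸ hlt).1
          refine ⟨?_, ?_, ?_⟩
          · rcases hmem with h1 | ⟨p', hp', h2⟩
            · injection h1 with h1'
              exact Or.inr ⟨p, List.mem_cons_self, hv, h1'.symm⟩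
            · exact Or.inr ⟨p', List.mem_cons_of_mem _ hp', h2⟩
          · intro a ha
            injection ha with ha'
            rw [← ha']
            exact lexLe_trans hbp hpb0
          · intro p' hp' hv'
            rcases List.mem_cons.mp hp' with rfl | hp''
            · exact hbp
            · exact hall p' hp'' hv'
        · rw [if_neg hlt] at h
          obtain ⟨hmem, hacc, hall⟩ := ih _ b h
          have hb0b : lexLe b b0 := hacc _ rfl
          have hb0p : lexLe b0 (p.2, p.1) := by
            rcases Bool.eq_false_or_eq_true (lexLe b0 (p.2, p.1)) with h2 | h2
            · exact h2
            · rcases Bool.eq_false_or_eq_true (lexLe (p.2, p.1) b0) with h1 | h1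
              · exact absurd (by rw [h1, h2]; rfl) hlt
              · exact lexLe_total (by rw [h1]; exact Bool.false_ne_true)
          refine ⟨?_, ?_, ?_⟩
          · rcases hmem with h1 | ⟨p', hp', h2⟩
            · exact Or.inl h1
            · exact Or.inr ⟨p', List.mem_cons_of_mem _ hp', h2⟩
          · exact hacc
          · intro p' hp' hv'
            rcases List.mem_cons.mp hp' with rfl | hp''
            · exact lexLe_trans hb0b hb0p
            · exact hall p' hp'' hv'

theorem selectBest_eq_none_of {dist : PySem.Dict Int Int} {vis : PySem.Set Int}
    (h : ∀ p ∈ dist.items, PySem.Set.contains vis p.1 = true) :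
    selectBest dist vis = none :=
  sbFold_all_visited dist.items none h

theorem selectBest_eq_some {dist : PySem.Dict Int Int} {vis : PySem.Set Int} {n c : Int}
    (hmem : (n, c) ∈ dist.items) (hun : PySem.Set.contains vis n = false)
    (hmin : ∀ p ∈ dist.items, PySem.Set.contains vis p.1 = false → lexLe (c, n) (p.2, p.1)) :
    selectBest dist vis = some (c, n) := by
  unfold selectBest
  cases hr : sbFold vis dist.items none with
  | none => exact absurd hr (sbFold_ne_none_of_mem dist.items none hmem hun)
  | some b =>
    obtain ⟨hmemb, _, hall⟩ := sbFold_some dist.items none b hr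
    rcases hmemb with h1 | ⟨p', hp', hv', rfl⟩
    · cases h1
    · have h2 : lexLe (c, n) (p'.2, p'.1) := hmin p' hp' hv'
      have h3 : lexLe (p'.2, p'.1) (c, n) := hall (n, c) hmem hun
      rw [lexLe_antisymm h3 h2]

-- ---- relax (B's relaxation loop) computes the pointwise min with A's pushed entries ----
theorem pushesOf_cons (kv : (Int × Int) × Int) (l : List ((Int × Int) × Int)) (node cost : Int) :
    pushesOf (kv :: l) node cost =
      if kv.1.1 == node || kv.1.2 == node then
        (cost + kv.2, if kv.1.1 == node then kv.1.2 else kv.1.1) :: pushesOf l node cost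
      else pushesOf l node cost := by
  by_cases h : (kv.1.1 == node || kv.1.2 == node) = true
  · simp [pushesOf, h]
  · simp only [pushesOf, List.filter_cons]
    rw [if_neg h, if_neg h]

theorem relax_get? {node cost : Int} :
    ∀ (l : List ((Int × Int) × Int)) (dist : PySem.Dict Int Int) (m : Int),
    (relax l node cost dist).get? m = omin (dist.get? m) (minCost (pushesOf l node cost) m) := by
  intro l
  induction l with
  | nil =>
    intro dist m
    simp only [relax, List.foldl_nil, pushesOf, List.filter_nil, List.map_nil, minCost]
    cases dist.get? m <;> simp [omin]
  | cons kv l ih =>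
    intro dist m
    rw [pushesOf_cons]
    by_cases hkv : (kv.1.1 == node || kv.1.2 == node) = true
    · rw [if_pos hkv]
      have hstep : relax (kv :: l) node cost dist = relax l node cost
          (match dist.get? (if kv.1.1 == node then kv.1.2 else kv.1.1) with
           | none => dist.insert (if kv.1.1 == node then kv.1.2 else kv.1.1) (cost + kv.2)
           | some old => if cost + kv.2 < old then dist.insert (if kv.1.1 == node then kv.1.2 else kv.1.1) (cost + kv.2) else dist) := by
        simp only [relax, List.foldl_cons, hkv, if_pos]
      rw [hstep, ih]
      set m' := (if kv.1.1 == node then kv.1.2 else kv.1.1) with hm'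
      set nc := cost + kv.2 with hnc
      by_cases hm : m = m'
      · rw [hm]
        have hd1 : (match dist.get? m' with
            | none => dist.insert m' nc
            | some old => if nc < old then dist.insert m' nc else dist).get? m'
            = omin (dist.get? m') (some nc) := by
          cases hg : dist.get? m' with
          | none => simp [omin, PySem.Dict.get?_insert_self]
          | some old =>
            dsimp only
            by_cases hlt : nc < old
            · rw [if_pos hlt]
              simp [omin, PySem.Dict.get?_insert_self, min_eq_right (le_of_lt hlt)]
            · rw [if_neg hlt]
              rw [hg]
              simp [omin, min_eq_left (by omega : old ≤ nc)]
        rw [hd1]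
        rw [show minCost ((nc, m') :: pushesOf l node cost) m'
            = omin (some nc) (minCost (pushesOf l node cost) m') from
          minCost_cons_self (nc, m') _]
        rw [← omin_assoc]
      · have hd1 : (match dist.get? m' with
            | none => dist.insert m' nc
            | some old => if nc < old then dist.insert m' nc else dist).get? m
            = dist.get? m := by
          cases hg : dist.get? m' with
          | none => exact PySem.Dict.get?_insert_of_ne _ _ hm
          | some old =>
            dsimp only
            split
            · exact PySem.Dict.get?_insert_of_ne _ _ hm
            · rfl
        rw [hd1, minCost_cons_ne (by simpa using fun h => hm h.symm)]
    · rw [if_neg hkv]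
      have hstep : relax (kv :: l) node cost dist = relax l node cost dist := by
        simp only [relax, List.foldl_cons, hkv, Bool.false_eq_true, if_false]
      rw [hstep, ih]

theorem relax_nodup {node cost : Int} :
    ∀ (l : List ((Int × Int) × Int)) (dist : PySem.Dict Int Int),
    dist.keys.Nodup → (relax l node cost dist).keys.Nodup := by
  intro l
  induction l with
  | nil => intro dist h; exact h
  | cons kv l ih =>
    intro dist h
    simp only [relax, List.foldl_cons]
    split
    · apply ih
      split
      · exact PySem.Dict.nodup_keys_insert _ _ _ h
      · split
        · exact PySem.Dict.nodup_keys_insert _ _ _ h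
        · exact h
    · exact ih dist h


-- ---- unfolding lemmas for A's loop ----
theorem viagemLoop_none {routes : PySem.Dict (Int × Int) Int} {d : Int}
    {q : List (Int × Int)} (vis : PySem.Set Int) (h : popMin q = none) :
    viagemLoop routes d q vis = -1 := by
  rw [viagemLoop.eq_def]
  split
  · rfl
  · rename_i heq; rw [h] at heq; cases heq

theorem viagemLoop_return {routes : PySem.Dict (Int × Int) Int} {d : Int}
    {q q' : List (Int × Int)} {c : Int} (vis : PySem.Set Int)
    (h : popMin q = some ((c, d), q')) : viagemLoop routes d q vis = c := by
  rw [viagemLoop.eq_def]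
  split
  · rename_i heq; rw [h] at heq; cases heq
  · rename_i cost node q'' heq
    rw [h] at heq
    injection heq with heq'
    obtain ⟨h1, h2⟩ := Prod.mk.injEq .. ▸ heq'
    obtain ⟨h3, h4⟩ := Prod.mk.injEq .. ▸ h1
    rw [if_pos h4.symm, h3]

theorem viagemLoop_skip {routes : PySem.Dict (Int × Int) Int} {d : Int}
    {q q' : List (Int × Int)} {c n : Int} (vis : PySem.Set Int)
    (h : popMin q = some ((c, n), q')) (hne : n ≠ d)
    (hvis : PySem.Set.contains vis n = true) :
    viagemLoop routes d q vis = viagemLoop routes d q' vis := by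
  rw [viagemLoop.eq_def]
  split
  · rename_i heq; rw [h] at heq; cases heq
  · rename_i cost node q'' heq
    rw [h] at heq
    injection heq with heq'
    obtain ⟨h1, h2⟩ := Prod.mk.injEq .. ▸ heq'
    obtain ⟨h3, h4⟩ := Prod.mk.injEq .. ▸ h1
    subst h2
    rw [if_neg (h4 ▸ hne), if_pos (h4 ▸ hvis)]

theorem viagemLoop_visit {routes : PySem.Dict (Int × Int) Int} {d : Int}
    {q q' : List (Int × Int)} {c n : Int} (vis : PySem.Set Int)
    (h : popMin q = some ((c, n), q')) (hne : n ≠ d)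
    (hvis : PySem.Set.contains vis n = false) :
    viagemLoop routes d q vis
      = viagemLoop routes d (q' ++ pushesOf routes.items n c) (PySem.Set.add vis n) := by
  rw [viagemLoop.eq_def]
  split
  · rename_i heq; rw [h] at heq; cases heq
  · rename_i cost node q'' heq
    rw [h] at heq
    injection heq with heq'
    obtain ⟨h1, h2⟩ := Prod.mk.injEq .. ▸ heq'
    obtain ⟨h3, h4⟩ := Prod.mk.injEq .. ▸ h1
    subst h2 h3 h4
    rw [if_neg hne, if_neg (by rw [hvis]; exact Bool.false_ne_true)]

theorem setContains_false_iff {s : PySem.Set Int} {x : Int} :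
    PySem.Set.contains s x = false ↔ x ∉ s := by
  constructor
  · intro h hm
    rw [← PySem.Set.contains_iff _ _] at hm
    rw [h] at hm
    cases hm
  · intro h
    cases hb : PySem.Set.contains s x
    · rfl
    · exact absurd ((PySem.Set.contains_iff _ _).mp hb) h

-- ---- the bisimulation: A's lazy-heap loop equals B's counted scan loop ----
theorem loop_eq (routes : PySem.Dict (Int × Int) Int) (d : Int) (υ : Finset Int)
    (hυ : ∀ kv ∈ routes.items, kv.1.1 ∈ υ ∧ kv.1.2 ∈ υ) :
    ∀ (q : List (Int × Int)) (vis : PySem.Set Int),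
      (∀ e ∈ q, e.2 ∈ υ) → PySem.Set.contains vis d = false →
      ∀ (dist : PySem.Dict Int Int) (k : Nat), dist.keys.Nodup →
        (∀ m, PySem.Set.contains vis m = false → dist.get? m = minCost q m) →
        (υ \ vis.toFinset).card ≤ k →
        viagemLoop routes d q vis = altLoop routes d k dist vis := by
  intro q vis
  induction q, vis using viagemLoop.induct routes d with
  | case1 q vis hq =>
    intro _ hvisd dist k hnd hinv hcard
    rw [viagemLoop_none vis hq]
    have hqnil : q = [] := popMin_eq_none hq
    have hall : ∀ p ∈ dist.items, PySem.Set.contains vis p.1 = true := by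
      intro p hp
      cases hb : PySem.Set.contains vis p.1
      · exfalso
        have h1 : dist.get? p.1 = some p.2 :=
          PySem.Dict.get?_of_mem_items _ (by simpa using hp) hnd
        have h2 : dist.get? p.1 = minCost q p.1 := hinv p.1 hb
        rw [hqnil] at h2
        simp [minCost, h1] at h2
      · rfl
    cases k with
    | zero => rfl
    | succ k =>
      have hsel := selectBest_eq_none_of hall
      simp [altLoop, hsel]
  | case2 q vis cost q' h =>
    intro hq hvisd dist k hnd hinv hcard
    rw [viagemLoop_return vis h]
    have hdq : (cost, d) ∈ q := (popMin_perm h).mem_iff.mpr List.mem_cons_self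
    have hdυ : d ∈ υ := hq _ hdq
    have hdvis : d ∉ vis.toFinset := by
      simp only [List.mem_toFinset]
      exact setContains_false_iff.mp hvisd
    have hk : 1 ≤ k := by
      have : 0 < (υ \ vis.toFinset).card :=
        Finset.card_pos.mpr ⟨d, Finset.mem_sdiff.mpr ⟨hdυ, hdvis⟩⟩
      omega
    obtain ⟨k', rfl⟩ : ∃ k', k = k' + 1 := ⟨k - 1, by omega⟩
    have hgd : dist.get? d = some cost := by
      rw [hinv d hvisd]
      exact minCost_pop_self h
    have hsel : selectBest dist vis = some (cost, d) := by
      apply selectBest_eq_some (PySem.Dict.mem_items_of_get?_eq_some _ hgd) hvisd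
      intro p hp hpv
      have h1 : dist.get? p.1 = some p.2 :=
        PySem.Dict.get?_of_mem_items _ (by simpa using hp) hnd
      have h2 : (p.2, p.1) ∈ q :=
        (minCost_eq_some_iff.mp ((hinv p.1 hpv).symm.trans h1)).1
      exact popMin_le h _ h2
    simp [altLoop, hsel]
  | case3 q vis cost node q' h hne hvis ih =>
    intro hq hvisd dist k hnd hinv hcard
    rw [viagemLoop_skip vis h hne hvis]
    apply ih
    · intro e he
      exact hq e ((popMin_perm h).mem_iff.mpr (List.mem_cons_of_mem _ he))
    · exact hvisd
    · exact hnd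
    · intro m hm
      rw [hinv m hm]
      exact minCost_pop_ne h (by
        intro rfl'
        rw [rfl'] at hm
        rw [hvis] at hm
        cases hm)
    · exact hcard
  | case4 q vis cost node q' h hne hvis ih =>
    intro hq hvisd dist k hnd hinv hcard
    have hvisf : PySem.Set.contains vis node = false := by
      cases hb : PySem.Set.contains vis node
      · rfl
      · exact absurd hb hvis
    rw [viagemLoop_visit vis h hne hvisf]
    have hnq : (cost, node) ∈ q := (popMin_perm h).mem_iff.mpr List.mem_cons_self
    have hnυ : node ∈ υ := hq _ hnq
    have hnvis : node ∉ vis.toFinset := by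
      simp only [List.mem_toFinset]
      exact setContains_false_iff.mp hvisf
    have hnmem : node ∈ υ \ vis.toFinset := Finset.mem_sdiff.mpr ⟨hnυ, hnvis⟩
    have hk : 1 ≤ k := by
      have : 0 < (υ \ vis.toFinset).card := Finset.card_pos.mpr ⟨node, hnmem⟩
      omega
    obtain ⟨k', rfl⟩ : ∃ k', k = k' + 1 := ⟨k - 1, by omega⟩
    have hgn : dist.get? node = some cost := by
      rw [hinv node hvisf]
      exact minCost_pop_self h
    have hsel : selectBest dist vis = some (cost, node) := by
      apply selectBest_eq_some (PySem.Dict.mem_items_of_get?_eq_some _ hgn) hvisf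
      intro p hp hpv
      have h1 : dist.get? p.1 = some p.2 :=
        PySem.Dict.get?_of_mem_items _ (by simpa using hp) hnd
      have h2 : (p.2, p.1) ∈ q :=
        (minCost_eq_some_iff.mp ((hinv p.1 hpv).symm.trans h1)).1
      exact popMin_le h _ h2
    have hstep : altLoop routes d (k' + 1) dist vis
        = altLoop routes d k' (relax routes.items node cost dist) (PySem.Set.add vis node) := by
      simp [altLoop, hsel, hne]
    rw [hstep]
    apply ih
    · intro e he
      rcases List.mem_append.mp he with h1 | h1
      · exact hq e ((popMin_perm h).mem_iff.mpr (List.mem_cons_of_mem _ h1))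
      · obtain ⟨kv, hkv, hin⟩ := List.mem_flatMap.mp (pushesOf_snd_mem h1)
        simp only [List.mem_cons, List.not_mem_nil, or_false] at hin
        rcases hin with h2 | h2
        · rw [h2]; exact (hυ kv hkv).1
        · rw [h2]; exact (hυ kv hkv).2
    · apply setContains_false_iff.mpr
      intro hmem
      rcases (PySem.Set.mem_add _ _ _).mp hmem with h1 | h1
      · exact setContains_false_iff.mp hvisd h1
      · exact hne h1.symm
    · exact relax_nodup routes.items dist hnd
    · intro m hm
      have hm' : m ∉ PySem.Set.add vis node := setContains_false_iff.mp hm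
      have hmv : m ∉ vis := fun h1 => hm' ((PySem.Set.mem_add _ _ _).mpr (Or.inl h1))
      have hmn : m ≠ node := fun h1 => hm' ((PySem.Set.mem_add _ _ _).mpr (Or.inr h1))
      rw [relax_get? routes.items dist m,
          hinv m (setContains_false_iff.mpr hmv),
          minCost_pop_ne h hmn,
          minCost_append]
    · have haddset : (PySem.Set.add vis node).toFinset = insert node vis.toFinset := by
        ext x
        simp only [List.mem_toFinset, Finset.mem_insert]
        rw [PySem.Set.mem_add _ _ _]
        tauto
      rw [haddset]
      have : υ \ insert node vis.toFinset = (υ \ vis.toFinset).erase node := by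
        ext x
        simp only [Finset.mem_sdiff, Finset.mem_insert, Finset.mem_erase]
        tauto
      rw [this, Finset.card_erase_of_mem hnmem]
      omega

-- ===== VERDICT (by name: the statement is the Claim_ definition above) =====
theorem viagem_spec : Claim_equal_viagem := by
  intro rotas o d _
  show viagem rotas o d = viagem_alt rotas o d
  show viagemLoop (buildRoutes rotas) d [(0, o)] PySem.Set.empty
    = altLoop (buildRoutes rotas) d
        (PySem.Set.ofList (o :: (buildRoutes rotas).items.flatMap (fun kv => [kv.1.1, kv.1.2]))).length
        (PySem.Dict.empty.insert o 0) PySem.Set.empty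
  set routes := buildRoutes rotas with hroutes
  set nodes : PySem.Set Int :=
    PySem.Set.ofList (o :: routes.items.flatMap (fun kv => [kv.1.1, kv.1.2])) with hnodes
  apply loop_eq routes d nodes.toFinset
  · intro kv hkv
    constructor <;>
    · simp only [List.mem_toFinset, hnodes]
      rw [PySem.Set.mem_ofList]
      exact List.mem_cons_of_mem _ (List.mem_flatMap.mpr ⟨kv, hkv, by simp⟩)
  · intro e he
    rw [List.mem_singleton.mp he]
    simp only [List.mem_toFinset, hnodes]
    rw [PySem.Set.mem_ofList]
    exact List.mem_cons_self
  · rfl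
  · exact PySem.Dict.nodup_keys_insert _ _ _ PySem.Dict.nodup_keys_empty
  · intro m _
    by_cases hm : m = o
    · subst hm
      rw [PySem.Dict.get?_insert_self]
      simp [minCost]
    · rw [PySem.Dict.get?_insert_of_ne _ _ hm, PySem.Dict.get?_empty]
      have hne : ((0 : Int), o).2 ≠ m := fun h => hm (by simpa using h.symm)
      rw [minCost_cons_ne hne]
      rfl
  · have : (PySem.Set.empty : PySem.Set Int).toFinset = ∅ := rfl
    rw [this, Finset.sdiff_empty]
    exact le_of_eq (List.toFinset_card_of_nodup (PySem.Set.nodup_ofList _))
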